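-- pv_equiv track=rewrite | github.com/SkyMoan/NTNU | TDT4110 - Informasjonsteknologi, Grunnkurs/Priskrig.py | rank_stores
-- ===== SOURCE A (Python) =====
-- def rank_stores(storeList,sumStores):
--     switch = True
--     while(switch):
--         switch = False
--         for i in range(len(storeList)-1):
--             if sumStores[i+1]<sumStores[i]:
--                 switch = True
--                 temp = sumStores[i]
--                 sumStores[i] = sumStores[i+1]
--                 sumStores[i+1] = temp
--                 temp = storeList[i]
--                 storeList[i] = storeList[i+1]
--                 storeList[i+1] = temp
--     return storeList
-- ===== SOURCE B (Python) =====
-- def rank_stores(storeList, sumStores):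
--     n = len(storeList)
--     order = sorted(range(n), key=lambda i: sumStores[i])
--     storeList[:] = [storeList[i] for i in order]
--     sumStores[:n] = [sumStores[i] for i in order]
--     return storeList
-- ===== Notes on version B (the rewrite author's own statement) =====
-- stated objective: faster
-- what changed: Replaces repeated whole-list bubble-sort passes with adjacent swaps by building a stable permutation of indices once (sorted(range(n), key=...)) and reordering both lists in a single slice-assignment pass.
-- outside the precondition, e.g. on rank_stores(['a'], []): A returns ['a'], B raises IndexError
import Mathlib
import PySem

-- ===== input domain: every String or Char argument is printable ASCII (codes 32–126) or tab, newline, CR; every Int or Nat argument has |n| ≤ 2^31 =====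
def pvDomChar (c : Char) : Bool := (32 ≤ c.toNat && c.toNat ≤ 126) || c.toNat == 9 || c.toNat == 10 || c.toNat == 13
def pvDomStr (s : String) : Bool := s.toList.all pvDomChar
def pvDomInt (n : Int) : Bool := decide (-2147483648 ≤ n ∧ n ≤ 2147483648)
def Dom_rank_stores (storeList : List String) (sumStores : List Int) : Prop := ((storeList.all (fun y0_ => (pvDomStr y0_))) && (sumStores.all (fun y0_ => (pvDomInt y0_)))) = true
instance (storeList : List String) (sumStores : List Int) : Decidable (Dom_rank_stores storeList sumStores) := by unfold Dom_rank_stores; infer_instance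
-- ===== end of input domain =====

-- B replaces A's repeated bubble-sort passes by one stable index sort (O(n log n) vs O(n^2)).
-- Both Pythons reorder the argument lists in place; the equivalence proved here is about the RETURN value.

-- ===== PORT A =====
-- One bubble pass carrying the current element x along the rest of the list
-- (this is A's inner `for i in range(len(...)-1)` loop: swap adjacent elements whose
-- keys are strictly inverted, remember in the flag whether any swap happened).
def pvBubblePass {α : Type} (key : α → Int) : α → List α → List α × Bool
  | x, [] => ([x], false)
  | x, y :: t =>
    if key y < key x then
      -- swap: y moves left, x is carried on; switch = True
      ((y :: (pvBubblePass key x t).1), true)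
    else
      ((x :: (pvBubblePass key y t).1), (pvBubblePass key y t).2)

def pvBubblePassTop {α : Type} (key : α → Int) : List α → List α × Bool
  | [] => ([], false)
  | x :: t => pvBubblePass key x t

-- A's `while(switch)` loop; the fuel only makes the recursion total (it is provably
-- never exhausted: the inversion count, bounded by length², drops on every swapping pass).
def pvBubbleLoop {α : Type} (key : α → Int) : Nat → List α → List α
  | 0, l => l
  | fuel + 1, l =>
    let (r, sw) := pvBubblePassTop key l
    if sw then pvBubbleLoop key fuel r else r

def rank_stores (storeList : List String) (sumStores : List Int) : List String :=
  -- A swaps the two parallel lists in lockstep, keyed by the sums: one list of pairs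
  let pairs := sumStores.zip storeList
  (pvBubbleLoop (fun p => p.1) (pairs.length * pairs.length + 1) pairs).map Prod.snd

-- ===== PORT B =====
def rank_stores_alt (storeList : List String) (sumStores : List Int) : List String :=
  let order := PySem.List.sorted (PySem.List.pyRange 0 (storeList.length : Int) 1)
      (fun i => PySem.List.pyGetD sumStores i 0)
  order.map (fun i => PySem.List.pyGetD storeList i "")

-- ===== PRECONDITION & SPEC =====
-- Pre_ restricts to well-formed parallel lists: sumStores covers storeList. On shorter
-- sumStores A raises IndexError — except when storeList has at most one element, where A
-- accidentally returns it unchanged despite the missing sums, while B raises there.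
def Pre_rank_stores (storeList : List String) (sumStores : List Int) : Prop :=
  storeList.length ≤ sumStores.length
instance (storeList : List String) (sumStores : List Int) : Decidable (Pre_rank_stores storeList sumStores) := by unfold Pre_rank_stores; infer_instance

def pvWitness_rank_stores : List String × List Int := (["alpha", "beta", "gamma"], [7, 3, 7])

def Spec_rank_stores (storeList : List String) (sumStores : List Int) (out : List String) : Prop := out = rank_stores_alt storeList sumStores
instance (storeList : List String) (sumStores : List Int) (out : List String) : Decidable (Spec_rank_stores storeList sumStores out) := by unfold Spec_rank_stores; infer_instance

-- ===== CLAIM (what is proved, stated in full; the proofs are below) =====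
def Claim_equal_rank_stores : Prop := ∀ (storeList : List String) (sumStores : List Int), Dom_rank_stores storeList sumStores → Pre_rank_stores storeList sumStores → Spec_rank_stores storeList sumStores (rank_stores storeList sumStores)

-- ===== LEMMAS AND PROOFS =====

-- number of (not necessarily adjacent) inversions, the loop's termination measure
def pvInv {α : Type} (key : α → Int) : List α → Nat
  | [] => 0
  | a :: t => t.countP (fun b => decide (key b < key a)) + pvInv key t

theorem pvBubblePass_perm {α : Type} (key : α → Int) (x : α) (t : List α) :
    (pvBubblePass key x t).1.Perm (x :: t) := by
  induction t generalizing x with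
  | nil => simp [pvBubblePass]
  | cons y t ih =>
    simp only [pvBubblePass]
    split
    · exact ((ih x).cons y).trans (List.Perm.swap x y t)
    · exact (ih y).cons x

theorem pvBubblePass_flag_false {α : Type} (key : α → Int) (x : α) (t : List α)
    (h : (pvBubblePass key x t).2 = false) :
    (pvBubblePass key x t).1 = x :: t ∧ (x :: t).Pairwise (fun a b => key a ≤ key b) := by
  induction t generalizing x with
  | nil => simp [pvBubblePass]
  | cons y t ih =>
    simp only [pvBubblePass] at h ⊢
    split at h
    · simp at h
    · rename_i hxy
      simp only at h
      obtain ⟨h1, h2⟩ := ih y h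
      refine ⟨by simp [hxy, h1, h], ?_⟩
      constructor
      · intro z hz
        rcases List.mem_cons.1 hz with hz | hz
        · subst hz; omega
        · have := (List.pairwise_cons.1 h2).1 z hz; omega
      · exact h2

theorem pvBubblePass_pairwise {α : Type} (key : α → Int) (Q : α → α → Prop)
    (hQ : ∀ a b, key b < key a → Q b a) (x : α) (t : List α)
    (h : (x :: t).Pairwise Q) : (pvBubblePass key x t).1.Pairwise Q := by
  induction t generalizing x with
  | nil => simp [pvBubblePass]
  | cons y t ih =>
    rw [List.pairwise_cons] at h
    obtain ⟨hx, hyt⟩ := h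
    rw [List.pairwise_cons] at hyt
    obtain ⟨hy, ht⟩ := hyt
    simp only [pvBubblePass]
    split
    · rename_i hswap
      rw [List.pairwise_cons]
      refine ⟨?_, ih x (List.pairwise_cons.2 ⟨fun z hz => hx z (List.mem_cons_of_mem y hz), ht⟩)⟩
      intro z hz
      rcases List.mem_cons.1 ((pvBubblePass_perm key x t).mem_iff.1 hz) with rfl | hz'
      · exact hQ z y hswap
      · exact hy z hz'
    · rw [List.pairwise_cons]
      refine ⟨?_, ih y (List.pairwise_cons.2 ⟨hy, ht⟩)⟩
      intro z hz
      rcases List.mem_cons.1 ((pvBubblePass_perm key y t).mem_iff.1 hz) with rfl | hz'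
      · exact hx z List.mem_cons_self
      · exact hx z (List.mem_cons_of_mem y hz')

theorem pvBubblePass_inv {α : Type} (key : α → Int) (x : α) (t : List α) :
    pvInv key (pvBubblePass key x t).1 + (if (pvBubblePass key x t).2 then 1 else 0)
      ≤ pvInv key (x :: t) := by
  induction t generalizing x with
  | nil => simp [pvBubblePass, pvInv]
  | cons y t ih =>
    simp only [pvBubblePass]
    split
    · rename_i hswap
      have hperm := pvBubblePass_perm key x t
      have hcnt : (pvBubblePass key x t).1.countP (fun b => decide (key b < key y))
          = (x :: t).countP (fun b => decide (key b < key y)) := hperm.countP_eq _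
      have hx : (x :: t).countP (fun b => decide (key b < key y))
          = t.countP (fun b => decide (key b < key y)) := by
        rw [List.countP_cons]
        simp [show ¬ key x < key y by omega]
      have := ih x
      simp only [pvInv, hcnt, hx]
      simp only [pvInv] at this ⊢
      have hy : (y :: t).countP (fun b => decide (key b < key x))
          = (if key y < key x then 1 else 0) + t.countP (fun b => decide (key b < key x)) := by
        rw [List.countP_cons]
        split
        · simp_all; omega
        · simp_all
      rw [hy]
      simp only [hswap, if_pos trivial]
      omega
    · rename_i hswap
      have hperm := pvBubblePass_perm key y t
      have hcnt : (pvBubblePass key y t).1.countP (fun b => decide (key b < key x))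
          = (y :: t).countP (fun b => decide (key b < key x)) := hperm.countP_eq _
      have := ih y
      simp only [pvInv, hcnt]
      simp only [pvInv] at this ⊢
      omega

theorem pvInv_le_sq {α : Type} (key : α → Int) (l : List α) :
    pvInv key l ≤ l.length * l.length := by
  induction l with
  | nil => simp [pvInv]
  | cons a t ih =>
    have h1 : t.countP (fun b => decide (key b < key a)) ≤ t.length := List.countP_le_length
    simp only [pvInv, List.length_cons]
    have : (t.length + 1) * (t.length + 1) = t.length * t.length + 2 * t.length + 1 := by ring
    omega

theorem pvBubbleLoop_props {α : Type} (key : α → Int) (Q : α → α → Prop)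
    (hQ : ∀ a b, key b < key a → Q b a) :
    ∀ (fuel : Nat) (l : List α), pvInv key l < fuel → l.Pairwise Q →
      (pvBubbleLoop key fuel l).Perm l ∧ (pvBubbleLoop key fuel l).Pairwise Q ∧
        (pvBubbleLoop key fuel l).Pairwise (fun a b => key a ≤ key b) := by
  intro fuel
  induction fuel with
  | zero => intro l h; omega
  | succ f ih =>
    intro l hinv hQl
    match l with
    | [] => simp [pvBubbleLoop, pvBubblePassTop]
    | x :: t =>
      simp only [pvBubbleLoop, pvBubblePassTop]
      by_cases hsw : (pvBubblePass key x t).2 = true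
      · have hdec := pvBubblePass_inv key x t
        rw [hsw] at hdec; simp at hdec
        have h1 := ih (pvBubblePass key x t).1 (by omega)
          (pvBubblePass_pairwise key Q hQ x t hQl)
        simp only [hsw, if_true]
        exact ⟨h1.1.trans (pvBubblePass_perm key x t), h1.2⟩
      · simp only [Bool.not_eq_true] at hsw
        obtain ⟨heq, hord⟩ := pvBubblePass_flag_false key x t hsw
        simp only [hsw, if_false, heq, Bool.false_eq_true]
        exact ⟨List.Perm.refl _, hQl, hord⟩

-- insertion sort (PySem.List.sorted) is stable: inserting preserves key-order together with
-- any Pairwise Q compatible with strict key order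
theorem pvInsertBy_pairwise {α : Type} (key : α → Int) (Q : α → α → Prop)
    (hQ : ∀ a b, key a < key b → Q a b) (x : α) :
    ∀ (acc : List α), acc.Pairwise (fun a b => key a ≤ key b ∧ Q a b) → (∀ y ∈ acc, Q y x) →
      (PySem.List.insertBy (fun a b => decide (key a < key b)) x acc).Pairwise
        (fun a b => key a ≤ key b ∧ Q a b) := by
  intro acc
  induction acc with
  | nil => simp [PySem.List.insertBy]
  | cons y ys ih =>
    intro hp hy
    rw [List.pairwise_cons] at hp
    simp only [PySem.List.insertBy]
    split
    · rename_i hlt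
      simp only [decide_eq_true_eq] at hlt
      rw [List.pairwise_cons]
      refine ⟨?_, List.pairwise_cons.2 hp⟩
      intro z hz
      rcases List.mem_cons.1 hz with rfl | hz
      · exact ⟨le_of_lt hlt, hQ x z hlt⟩
      · have hyz := hp.1 z hz
        have : key x < key z := lt_of_lt_of_le hlt hyz.1
        exact ⟨le_of_lt this, hQ x z this⟩
    · rename_i hge
      simp only [decide_eq_true_eq] at hge
      rw [List.pairwise_cons]
      refine ⟨?_, ih hp.2 (fun z hz => hy z (List.mem_cons_of_mem y hz))⟩
      intro z hz
      rw [PySem.List.mem_insertBy] at hz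
      rcases hz with hz | hz
      · subst hz; exact ⟨by omega, hy y List.mem_cons_self⟩
      · exact hp.1 z hz

theorem pvSorted_foldl_pairwise {α : Type} (key : α → Int) (Q : α → α → Prop)
    (hQ : ∀ a b, key a < key b → Q a b) :
    ∀ (rest acc : List α), acc.Pairwise (fun a b => key a ≤ key b ∧ Q a b) →
      (∀ y ∈ acc, ∀ x ∈ rest, Q y x) → rest.Pairwise Q →
      (rest.foldl (fun acc x => PySem.List.insertBy (fun a b => decide (key a < key b)) x acc) acc).Pairwise
        (fun a b => key a ≤ key b ∧ Q a b) := by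
  intro rest
  induction rest with
  | nil => intro acc h _ _; simpa using h
  | cons x rest ih =>
    intro acc hacc hsep hrest
    rw [List.pairwise_cons] at hrest
    simp only [List.foldl_cons]
    refine ih _ (pvInsertBy_pairwise key Q hQ x acc hacc
      (fun y hy => hsep y hy x List.mem_cons_self)) ?_ hrest.2
    intro y hy z hz
    rw [PySem.List.mem_insertBy] at hy
    rcases hy with hy | hy
    · subst hy; exact hrest.1 z hz
    · exact hsep y hy z (List.mem_cons_of_mem x hz)

theorem pvSorted_stable {α : Type} (key : α → Int) (Q : α → α → Prop)
    (hQ : ∀ a b, key a < key b → Q a b) (l : List α) (hl : l.Pairwise Q) :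
    (PySem.List.sorted l key).Pairwise Q := by
  rw [PySem.List.sorted_eq_foldl_insertBy]
  exact (pvSorted_foldl_pairwise key Q hQ l [] (by simp) (by simp) hl).imp (fun h => h.2)

-- sorted commutes with map when the key factors through the map
theorem pvInsertBy_map {α β : Type} (key : β → Int) (f : α → β) (x : α) (acc : List α) :
    PySem.List.insertBy (fun a b => decide (key a < key b)) (f x) (acc.map f)
      = (PySem.List.insertBy (fun a b => decide (key (f a) < key (f b))) x acc).map f := by
  induction acc with
  | nil => simp [PySem.List.insertBy]
  | cons y ys ih =>
    simp only [List.map_cons, PySem.List.insertBy]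
    split <;> simp_all

theorem pvSorted_map {α β : Type} (key : β → Int) (f : α → β) (l : List α) :
    PySem.List.sorted (l.map f) key = (PySem.List.sorted l (fun a => key (f a))).map f := by
  rw [PySem.List.sorted_eq_foldl_insertBy, PySem.List.sorted_eq_foldl_insertBy, List.foldl_map]
  suffices h : ∀ (acc : List α),
      l.foldl (fun acc x => PySem.List.insertBy (fun a b => decide (key a < key b)) (f x) acc) (acc.map f)
        = (l.foldl (fun acc x => PySem.List.insertBy (fun a b => decide (key (f a) < key (f b))) x acc) acc).map f by
    simpa using h []
  induction l with
  | nil => intro acc; simp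
  | cons x t ih => intro acc; simp only [List.foldl_cons, pvInsertBy_map]; exact ih _

-- the bubble pass and loop commute with map when the key factors through the map
theorem pvBubblePass_map {α β : Type} (key : β → Int) (f : α → β) (x : α) (t : List α) :
    pvBubblePass key (f x) (t.map f)
      = ((pvBubblePass (fun a => key (f a)) x t).1.map f, (pvBubblePass (fun a => key (f a)) x t).2) := by
  induction t generalizing x with
  | nil => simp [pvBubblePass]
  | cons y t ih => simp only [List.map_cons, pvBubblePass]; split <;> simp_all

theorem pvBubbleLoop_map {α β : Type} (key : β → Int) (f : α → β) (fuel : Nat) (l : List α) :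
    pvBubbleLoop key fuel (l.map f) = (pvBubbleLoop (fun a => key (f a)) fuel l).map f := by
  induction fuel generalizing l with
  | zero => simp [pvBubbleLoop]
  | succ n ih =>
    match l with
    | [] => simp [pvBubbleLoop, pvBubblePassTop]
    | x :: t =>
      simp only [List.map_cons, pvBubbleLoop, pvBubblePassTop, pvBubblePass_map]
      split <;> simp_all

-- indices in zipIdx are strictly increasing and bounded
theorem pvZipIdx_pairwise {α : Type} (l : List α) :
    (l.zipIdx).Pairwise (fun a b : α × Nat => a.2 < b.2) := by
  rw [List.pairwise_iff_getElem]
  intro i j hi hj hij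
  simp only [List.getElem_zipIdx]
  omega

-- the crux: A's bubble loop computes exactly Python's stable sort by the key
theorem pvBubble_eq_sorted (pairs : List (Int × String)) :
    pvBubbleLoop (fun p => p.1) (pairs.length * pairs.length + 1) pairs
      = PySem.List.sorted pairs (fun p => p.1) := by
  set n := pairs.length with hn
  set dec := pairs.zipIdx with hdec
  have hmap : dec.map Prod.fst = pairs := List.zipIdx_map_fst 0 pairs
  set kT : (Int × String) × Nat → Int := fun t => t.1.1 with hkT
  set Q : (Int × String) × Nat → (Int × String) × Nat → Prop :=
    fun a b => a.1.1 < b.1.1 ∨ a.2 < b.2 with hQdef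
  set c : (Int × String) × Nat → Int := fun t => t.1.1 * (n : Int) + t.2 with hc
  have hQ : ∀ a b, kT b < kT a → Q b a := fun a b h => Or.inl h
  have hQ' : ∀ a b, kT a < kT b → Q a b := fun a b h => Or.inl h
  have hdecQ : dec.Pairwise Q := (pvZipIdx_pairwise pairs).imp (fun h => Or.inr h)
  have hlen : dec.length = n := List.length_zipIdx
  -- bounds on indices of members of any permutation of dec
  have hbound : ∀ t ∈ dec, t.2 < n := by
    intro t ht
    obtain ⟨x, i⟩ := t
    have := List.mem_zipIdx ht
    omega
  -- a permutation of dec that is key-sorted and Q-pairwise is strictly c-increasing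
  have hstrict : ∀ (R : List ((Int × String) × Nat)), R.Perm dec →
      R.Pairwise (fun a b => kT a ≤ kT b) → R.Pairwise Q →
      R.Pairwise (fun a b => c a < c b) := by
    intro R hperm hle hq
    refine (hle.and hq).imp_of_mem ?_
    intro a b ha hb hab
    have han : a.2 < n := hbound a (hperm.mem_iff.1 ha)
    have hbn : (0 : Int) ≤ (b.2 : Int) := by positivity
    have hnn : (0 : Int) ≤ (n : Int) := by positivity
    obtain ⟨hle', hq'⟩ := hab
    simp only [hc]
    rcases hq' with h | h
    · have h1 : a.1.1 + 1 ≤ b.1.1 := h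
      have h2 : (a.2 : Int) < (n : Int) := by exact_mod_cast han
      nlinarith [mul_le_mul_of_nonneg_right h1 hnn]
    · have h2 : (a.2 : Int) < (b.2 : Int) := by exact_mod_cast h
      nlinarith [mul_le_mul_of_nonneg_right hle' hnn]
  -- A's loop on the decorated list
  have hfuel : pvInv kT dec < n * n + 1 := by
    have := pvInv_le_sq kT dec
    rw [hlen] at this; omega
  obtain ⟨hperm, hq, hle⟩ := pvBubbleLoop_props kT Q hQ (n * n + 1) dec hfuel hdecQ
  have hA : PySem.List.sorted dec c = pvBubbleLoop kT (n * n + 1) dec :=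
    PySem.List.sorted_eq_of_perm_of_pairwise_lt _ _ _ hperm (hstrict _ hperm hle hq)
  -- Python's sorted on the decorated list
  have hB : PySem.List.sorted dec c = PySem.List.sorted dec kT :=
    PySem.List.sorted_eq_of_perm_of_pairwise_lt _ _ _ (PySem.List.sorted_perm _ _ _)
      (hstrict _ (PySem.List.sorted_perm _ _ _) (PySem.List.sorted_pairwise _ _)
        (pvSorted_stable kT Q hQ' dec hdecQ))
  -- undecorate
  calc pvBubbleLoop (fun p => p.1) (n * n + 1) pairs
      = pvBubbleLoop (fun p => p.1) (n * n + 1) (dec.map Prod.fst) := by rw [hmap]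
    _ = (pvBubbleLoop kT (n * n + 1) dec).map Prod.fst := pvBubbleLoop_map _ _ _ _
    _ = (PySem.List.sorted dec kT).map Prod.fst := by rw [← hA, hB]
    _ = PySem.List.sorted (dec.map Prod.fst) (fun p => p.1) := (pvSorted_map _ _ _).symm
    _ = PySem.List.sorted pairs (fun p => p.1) := by rw [hmap]

-- B's index list maps onto the zipped pairs
theorem pvRange_map_pairs (storeList : List String) (sumStores : List Int)
    (hpre : storeList.length ≤ sumStores.length) :
    (PySem.List.pyRange 0 (storeList.length : Int) 1).map
        (fun i => (PySem.List.pyGetD sumStores i 0, PySem.List.pyGetD storeList i ""))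
      = sumStores.zip storeList := by
  rw [PySem.List.pyRange_one]
  apply List.ext_getElem
  · simp [List.length_zip]; omega
  · intro k h1 h2
    have hk : k < storeList.length := by simp at h1; omega
    simp only [List.getElem_map, List.getElem_range, List.getElem_zip]
    have hz : (0 : Int) + (k : Int) = ((k : Nat) : Int) := by omega
    rw [hz, PySem.List.pyGetD_natCast, PySem.List.pyGetD_natCast]
    rw [List.getD_eq_getElem _ _ (by omega), List.getD_eq_getElem _ _ (by omega)]

-- ===== VERDICT (by name: the statement is the Claim_ definition above) =====
theorem rank_stores_spec : Claim_equal_rank_stores := by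
  intro storeList sumStores _hdom hpre
  unfold Spec_rank_stores rank_stores rank_stores_alt
  simp only []
  rw [show (fun i => PySem.List.pyGetD storeList i "")
      = (fun p : Int × String => p.2) ∘ (fun i => (PySem.List.pyGetD sumStores i 0, PySem.List.pyGetD storeList i "")) from rfl]
  rw [← List.map_map]
  rw [show (fun i : Int => PySem.List.pyGetD sumStores i 0)
      = (fun a : Int => (fun p : Int × String => p.1) ((fun i => (PySem.List.pyGetD sumStores i 0, PySem.List.pyGetD storeList i "")) a)) from rfl]
  rw [← pvSorted_map (fun p : Int × String => p.1)
      (fun i => (PySem.List.pyGetD sumStores i 0, PySem.List.pyGetD storeList i "")) _]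
  rw [pvRange_map_pairs storeList sumStores hpre]
  rw [pvBubble_eq_sorted]
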